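-- pv_equiv track=rewrite | github.com/joshuamkite/advent-of-code | 2022/day-18/main.py | calculate_total_surface_area
-- ===== SOURCE A (Python) =====
-- NEIGHBORS = [(-1, 0, 0), (1, 0, 0),
--              (0, -1, 0), (0, 1, 0),
--              (0, 0, -1), (0, 0, 1)]
--
-- def calculate_total_surface_area(cubes):
--     """
--     Calculates the total surface area of the lava droplet.
--
--     Parameters:
--     - cubes (set): Set of tuples representing the positions of cubes.
--
--     Returns:
--     - int: Total surface area.
--     """
--     surface_area = 0
--     for cube in cubes:
--         x, y, z = cube
--         # Check all six neighbors
--         for dx, dy, dz in NEIGHBORS: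
--             neighbor = (x + dx, y + dy, z + dz)
--             if neighbor not in cubes:
--                 surface_area += 1  # Exposed side
--     return surface_area
-- ===== SOURCE B (Python) =====
-- def calculate_total_surface_area(cubes):
--     """Surface area = 6*len(cubes) - 2*(number of adjacent ordered pairs in +x/+y/+z)."""
--     adjacent = 0
--     for (x, y, z) in cubes:
--         for neighbor in ((x + 1, y, z), (x, y + 1, z), (x, y, z + 1)):
--             if neighbor in cubes:
--                 adjacent += 1
--     return 6 * len(cubes) - 2 * adjacent
-- ===== Notes on version B (the rewrite author's own statement) =====
-- stated objective: alternative
-- what changed: Instead of probing all six faces of every cube and counting exposed ones, B counts shared faces by checking only the three positive-direction neighbours per cube and returns 6*len(cubes) - 2*adjacency.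
import Mathlib
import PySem

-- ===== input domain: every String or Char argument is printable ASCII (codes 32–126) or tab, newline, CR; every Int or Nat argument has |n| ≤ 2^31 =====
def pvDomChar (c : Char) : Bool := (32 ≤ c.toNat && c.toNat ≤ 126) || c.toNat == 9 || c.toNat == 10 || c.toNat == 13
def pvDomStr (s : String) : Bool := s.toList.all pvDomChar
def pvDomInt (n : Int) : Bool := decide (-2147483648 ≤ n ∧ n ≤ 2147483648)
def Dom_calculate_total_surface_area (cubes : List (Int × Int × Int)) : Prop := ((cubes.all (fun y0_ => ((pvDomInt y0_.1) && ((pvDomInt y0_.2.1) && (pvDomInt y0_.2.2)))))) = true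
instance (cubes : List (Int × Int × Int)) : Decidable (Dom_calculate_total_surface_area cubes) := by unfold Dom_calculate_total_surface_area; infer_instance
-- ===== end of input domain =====

-- B counts shared faces (three positive-direction neighbours per cube) and returns
-- 6*len(cubes) - 2*adjacency, instead of probing all six faces of every cube (objective: alternative).

-- ===== PORT A =====
def NEIGHBORS : List (Int × Int × Int) :=
  [(-1, 0, 0), (1, 0, 0), (0, -1, 0), (0, 1, 0), (0, 0, -1), (0, 0, 1)]

def calculate_total_surface_area (cubes : List (Int × Int × Int)) : Int :=
  cubes.foldl (fun surface_area cube =>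
    NEIGHBORS.foldl (fun sa d =>
      if (cube.1 + d.1, cube.2.1 + d.2.1, cube.2.2 + d.2.2) ∈ cubes then sa else sa + 1)
      surface_area) 0

-- ===== PORT B =====
def calculate_total_surface_area_alt (cubes : List (Int × Int × Int)) : Int :=
  let adjacent := cubes.foldl (fun acc c =>
    ([(c.1 + 1, c.2.1, c.2.2), (c.1, c.2.1 + 1, c.2.2), (c.1, c.2.1, c.2.2 + 1)] :
        List (Int × Int × Int)).foldl (fun a n => if n ∈ cubes then a + 1 else a) acc) 0
  6 * PySem.List.len cubes - 2 * adjacent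

-- ===== PRECONDITION & SPEC =====
-- The Python function documents its argument as a SET of cube positions; Pre_ excludes lists with
-- duplicate cubes, on which A counts each duplicate's faces separately while B's shared-face formula
-- does not (the duplicate input is outside the function's documented domain).
def Pre_calculate_total_surface_area (cubes : List (Int × Int × Int)) : Prop := cubes.Nodup
instance (cubes : List (Int × Int × Int)) : Decidable (Pre_calculate_total_surface_area cubes) := by unfold Pre_calculate_total_surface_area; infer_instance

def pvWitness_calculate_total_surface_area : (List (Int × Int × Int)) := [(0, 0, 0), (1, 0, 0)]

def Spec_calculate_total_surface_area (cubes : List (Int × Int × Int)) (out : Int) : Prop := out = calculate_total_surface_area_alt cubes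
instance (cubes : List (Int × Int × Int)) (out : Int) : Decidable (Spec_calculate_total_surface_area cubes out) := by unfold Spec_calculate_total_surface_area; infer_instance

-- ===== CLAIM (what is proved, stated in full; the proofs are below) =====
def Claim_equal_calculate_total_surface_area : Prop := ∀ (cubes : List (Int × Int × Int)), Dom_calculate_total_surface_area cubes → Pre_calculate_total_surface_area cubes → Spec_calculate_total_surface_area cubes (calculate_total_surface_area cubes)

-- ===== LEMMAS AND PROOFS =====

def pAdd (a b : Int × Int × Int) : Int × Int × Int := (a.1 + b.1, a.2.1 + b.2.1, a.2.2 + b.2.2)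
def pNeg (a : Int × Int × Int) : Int × Int × Int := (-a.1, -a.2.1, -a.2.2)

-- per-cube indicator (as an Int) of "cube's d-neighbour is in S"
def chi (S : List (Int × Int × Int)) (c d : Int × Int × Int) : Int :=
  if pAdd c d ∈ S then 1 else 0

lemma pAdd_cancel (a d : Int × Int × Int) : pAdd (pAdd a d) (pNeg d) = a := by
  simp [pAdd, pNeg]

lemma pAdd_cancel' (a d : Int × Int × Int) : pAdd (pAdd a (pNeg d)) d = a := by
  simp [pAdd, pNeg]

-- on a duplicate-free list, the d-adjacency count equals the (-d)-adjacency count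
lemma cnt_symm (S : List (Int × Int × Int)) (h : S.Nodup) (d : Int × Int × Int) :
    S.countP (fun c => decide (pAdd c d ∈ S)) = S.countP (fun c => decide (pAdd c (pNeg d) ∈ S)) := by
  rw [List.countP_eq_length_filter, List.countP_eq_length_filter,
      ← List.toFinset_card_of_nodup (h.filter _), ← List.toFinset_card_of_nodup (h.filter _),
      List.toFinset_filter, List.toFinset_filter]
  apply Finset.card_bij (fun a _ => pAdd a d)
  · intro a ha
    simp only [Finset.mem_filter, List.mem_toFinset, decide_eq_true_eq] at ha ⊢
    exact ⟨ha.2, by rw [pAdd_cancel]; exact ha.1⟩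
  · intro a ha b hb hab
    have := congrArg (fun x => pAdd x (pNeg d)) hab
    simpa [pAdd_cancel] using this
  · intro b hb
    simp only [Finset.mem_filter, List.mem_toFinset, decide_eq_true_eq] at hb
    exact ⟨pAdd b (pNeg d), by
      simp only [Finset.mem_filter, List.mem_toFinset, decide_eq_true_eq]
      exact ⟨hb.2, by rw [pAdd_cancel']; exact hb.1⟩, pAdd_cancel' b d⟩

lemma sum_chi (S : List (Int × Int × Int)) (d : Int × Int × Int) :
    (S.map (fun c => chi S c d)).sum = (S.countP (fun c => decide (pAdd c d ∈ S)) : Int) := by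
  rw [← PySem.List.sum_map_ite_one_zero (fun c => decide (pAdd c d ∈ S)) S]
  simp [chi]

lemma chi_symm (S : List (Int × Int × Int)) (h : S.Nodup) (d : Int × Int × Int) :
    (S.map (fun c => chi S c d)).sum = (S.map (fun c => chi S c (pNeg d))).sum := by
  rw [sum_chi, sum_chi, cnt_symm S h d]

-- A's inner loop over the six neighbours, as a sum of indicators
lemma innerA (S : List (Int × Int × Int)) (c : Int × Int × Int) (acc : Int) :
    NEIGHBORS.foldl (fun sa d =>
      if (c.1 + d.1, c.2.1 + d.2.1, c.2.2 + d.2.2) ∈ S then sa else sa + 1) acc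
    = acc + 6 - (chi S c (-1, 0, 0) + chi S c (1, 0, 0) + chi S c (0, -1, 0)
               + chi S c (0, 1, 0) + chi S c (0, 0, -1) + chi S c (0, 0, 1)) := by
  simp only [NEIGHBORS, List.foldl, chi, pAdd]
  split_ifs <;> ring

-- B's inner loop over the three positive neighbours, as a sum of indicators
lemma innerB (S : List (Int × Int × Int)) (c : Int × Int × Int) (acc : Int) :
    ([(c.1 + 1, c.2.1, c.2.2), (c.1, c.2.1 + 1, c.2.2), (c.1, c.2.1, c.2.2 + 1)] :
        List (Int × Int × Int)).foldl (fun a n => if n ∈ S then a + 1 else a) acc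
    = acc + (chi S c (1, 0, 0) + chi S c (0, 1, 0) + chi S c (0, 0, 1)) := by
  simp only [List.foldl, chi, pAdd]
  norm_num
  split_ifs <;> ring

lemma outer_sum (L : List (Int × Int × Int)) (acc : Int) (step : Int → (Int × Int × Int) → Int)
    (g : (Int × Int × Int) → Int) (hstep : ∀ a c, step a c = a + g c) :
    L.foldl step acc = acc + (L.map g).sum := by
  induction L generalizing acc with
  | nil => simp
  | cons x xs ih => rw [List.foldl_cons, hstep, ih]; simp; ring

lemma sum_splitA (M L : List (Int × Int × Int)) :
    (L.map (fun c => 6 - (chi M c (-1, 0, 0) + chi M c (1, 0, 0) + chi M c (0, -1, 0)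
               + chi M c (0, 1, 0) + chi M c (0, 0, -1) + chi M c (0, 0, 1)))).sum
    = 6 * (L.length : Int)
      - ((L.map (fun c => chi M c (-1, 0, 0))).sum + (L.map (fun c => chi M c (1, 0, 0))).sum
       + (L.map (fun c => chi M c (0, -1, 0))).sum + (L.map (fun c => chi M c (0, 1, 0))).sum
       + (L.map (fun c => chi M c (0, 0, -1))).sum + (L.map (fun c => chi M c (0, 0, 1))).sum) := by
  induction L with
  | nil => simp
  | cons x xs ih => simp only [List.map_cons, List.sum_cons, ih, List.length_cons]; push_cast; ring

lemma sum_splitB (M L : List (Int × Int × Int)) :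
    (L.map (fun c => chi M c (1, 0, 0) + chi M c (0, 1, 0) + chi M c (0, 0, 1))).sum
    = (L.map (fun c => chi M c (1, 0, 0))).sum + (L.map (fun c => chi M c (0, 1, 0))).sum
      + (L.map (fun c => chi M c (0, 0, 1))).sum := by
  induction L with
  | nil => simp
  | cons x xs ih => simp only [List.map_cons, List.sum_cons, ih]; ring

-- ===== VERDICT (by name: the statement is the Claim_ definition above) =====
theorem calculate_total_surface_area_spec : Claim_equal_calculate_total_surface_area := by
  intro cubes _ hpre
  unfold Spec_calculate_total_surface_area
  unfold calculate_total_surface_area calculate_total_surface_area_alt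
  rw [outer_sum cubes 0 _ (fun c => 6 - (chi cubes c (-1, 0, 0) + chi cubes c (1, 0, 0)
        + chi cubes c (0, -1, 0) + chi cubes c (0, 1, 0) + chi cubes c (0, 0, -1)
        + chi cubes c (0, 0, 1))) (by intro a c; rw [innerA]; ring)]
  rw [outer_sum cubes 0 _ (fun c => chi cubes c (1, 0, 0) + chi cubes c (0, 1, 0)
        + chi cubes c (0, 0, 1)) (by intro a c; rw [innerB])]
  rw [sum_splitA, sum_splitB, PySem.List.len_eq]
  have h1 := chi_symm cubes hpre (1, 0, 0)
  have h2 := chi_symm cubes hpre (0, 1, 0)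
  have h3 := chi_symm cubes hpre (0, 0, 1)
  simp only [pNeg, neg_zero] at h1 h2 h3
  rw [← h1, ← h2, ← h3]
  ring
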